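-- pv_equiv track=rewrite | github.com/zofialuther/CS8395-08-Paper1-updated | data/translated-code/desc-to-python/java/Palindromic-gapful-numbers.py | getPalindromicGapfulEnding
-- ===== SOURCE A (Python) =====
-- def is_palindromic(num):
--     return str(num) == str(num)[::-1]
--
-- def is_gapful(num):
--     if len(str(num)) < 3:
--         return False
--     else:
--         first_last_concat = int(str(num)[0] + str(num)[-1])
--         return num % first_last_concat == 0
--
-- def getPalindromicGapfulEnding(ending, start=1):
--     result = []
--     num = start
--     while len(result) < ending:
--         if is_palindromic(num) and is_gapful(num):
--             result.append(num)
--         num += 1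
--     return result
-- ===== SOURCE B (Python) =====
-- def _next11(n):
--     # n is a multiple of 11 with n >= 110; return the first palindromic
--     # gapful number >= n (every palindromic gapful number is a >=3-digit
--     # multiple of 11: its first and last digit are the same d, so the
--     # divisor int(s[0]+s[-1]) is 11*d).
--     while True:
--         s = str(n)
--         if s == s[::-1] and n % (11 * int(s[0])) == 0:
--             return n
--         n += 11
--
--
-- def getPalindromicGapfulEnding(ending, start=1):
--     # Stride-11 scan decomposed as "find next, repeat `ending` times",
--     # instead of A's unit-stride scan of every integer.
--     lo = max(start, 100)
--     n = lo + (-lo) % 11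
--     result = []
--     for _ in range(ending):
--         n = _next11(n)
--         result.append(n)
--         n += 11
--     return result
-- ===== Notes on version B (the rewrite author's own statement) =====
-- stated objective: faster
-- what changed: B replaces A's single unit-stride while-loop with two helper predicates by a find-next helper that strides only over multiples of 11 from max(start,100) (every palindromic gapful number has equal first/last digit d, divisor 11*d, hence is a multiple of 11 with >= 3 digits), repeated ending times by a for-loop over range(ending).
import Mathlib
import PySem

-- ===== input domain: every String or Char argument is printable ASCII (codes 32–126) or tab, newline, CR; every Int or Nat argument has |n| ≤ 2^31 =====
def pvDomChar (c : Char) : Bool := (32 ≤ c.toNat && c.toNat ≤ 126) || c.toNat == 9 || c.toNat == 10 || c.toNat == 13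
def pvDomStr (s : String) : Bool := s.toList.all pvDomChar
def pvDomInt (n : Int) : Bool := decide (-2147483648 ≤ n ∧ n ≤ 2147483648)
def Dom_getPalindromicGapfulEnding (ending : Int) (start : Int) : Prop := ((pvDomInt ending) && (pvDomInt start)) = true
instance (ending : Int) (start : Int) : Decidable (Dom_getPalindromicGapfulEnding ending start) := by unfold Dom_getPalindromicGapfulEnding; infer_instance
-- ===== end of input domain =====

-- B finds each next palindromic gapful number by striding over multiples of 11 from
-- max(start,100) (every palindromic gapful number is such a multiple), repeated `ending`
-- times by a for-loop, instead of A's single unit-stride while-loop over all integers: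
-- a constant-factor speed-up.


-- Both while-loops below are made total by an explicit scan ceiling `pvBound` (a plain
-- arithmetic fuel bound: a power of 10 with at least `ending` palindromic gapful numbers
-- between `start` and it).  Theorem `pvInit` below proves the ceiling is never reached
-- before the result is full, so each guarded loop computes exactly what its Python computes
-- on every input.
def pvBound (ending start : Int) : Int :=
  10 ^ (2 * ((Nat.digits 10 start.toNat).length + ending.toNat) + 3) + 1

-- ===== PORT A =====
-- the Python pieces of A's test
def is_palindromic (num : Int) : Bool :=
  -- str(num) == str(num)[::-1]; the [::-1] slice never raises (step -1 ≠ 0), so getD's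
  -- default is never used
  PySem.Int.toChars num == (PySem.List.slice? (PySem.Int.toChars num) none none (-1)).getD []

def is_gapful (num : Int) : Bool :=
  if ((PySem.Int.toChars num).length : Int) < 3 then false
  else
    -- first_last_concat = int(str(num)[0] + str(num)[-1]); exact on A's reachable calls:
    -- str(num) is nonempty so both indexings return some, and when the test is reached with a
    -- palindromic num of ≥ 3 digits the two chars are one nonzero digit, so int() succeeds
    -- and the divisor is nonzero (Python raises on none of these inputs)
    let flc := (PySem.Int.ofChars? [(PySem.List.pyGet? (PySem.Int.toChars num) 0).getD ' ',
                                    (PySem.List.pyGet? (PySem.Int.toChars num) (-1)).getD ' ']).getD 0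
    PySem.Int.mod num flc == 0

-- the single while-loop of A: accumulate into result, step num by 1
def pvLoopA (V ending : Int) (result : List Int) (num : Int) : List Int :=
  if hv : num ≤ V then
    if (result.length : Int) < ending then
      if (is_palindromic num && is_gapful num) = true then
        pvLoopA V ending (result ++ [num]) (num + 1)
      else
        pvLoopA V ending result (num + 1)
    else result
  else result
termination_by (V + 1 - num).toNat
decreasing_by
  all_goals exact (Int.toNat_lt_toNat (Int.sub_pos.mpr (Int.lt_add_one_iff.mpr hv))).mpr (sub_lt_sub_left (lt_add_one num) (V + 1))

def getPalindromicGapfulEnding (ending : Int) (start : Int) : List Int :=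
  pvLoopA (pvBound ending start) ending [] start

-- ===== PORT B =====
-- B's inline candidate test: s == s[::-1] and n % (11 * int(s[0])) == 0
def pvTest (num : Int) : Bool :=
  (PySem.Int.toChars num == (PySem.List.slice? (PySem.Int.toChars num) none none (-1)).getD [])
  && (PySem.Int.mod num
        (11 * (PySem.Int.ofChars? [(PySem.List.pyGet? (PySem.Int.toChars num) 0).getD ' ']).getD 0) == 0)

-- _next11: the inner while-True loop, stepping by 11
def pvNextL (V num : Int) : Int :=
  if hv : num ≤ V then
    (if pvTest num = true then num else pvNextL V (num + 11))
  else num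
termination_by (V + 1 - num).toNat
decreasing_by
  exact (Int.toNat_lt_toNat (Int.sub_pos.mpr (Int.lt_add_one_iff.mpr hv))).mpr (sub_lt_sub_left (lt_add_of_pos_right num (by decide : (0:Int) < 11)) (V + 1))

-- the for-loop over range(ending): structural recursion on the trip count
def pvForL (V : Int) (k : Nat) (result : List Int) (num : Int) : List Int :=
  match k with
  | 0 => result
  | Nat.succ k => pvForL V k (result ++ [pvNextL V num]) (pvNextL V num + 11)

def getPalindromicGapfulEnding_alt (ending : Int) (start : Int) : List Int :=
  let lo := max start 100
  pvForL (pvBound ending start) ending.toNat [] (lo + PySem.Int.mod (-lo) 11)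

-- ===== PRECONDITION & SPEC =====
def Spec_getPalindromicGapfulEnding (ending : Int) (start : Int) (out : List Int) : Prop := out = getPalindromicGapfulEnding_alt ending start
instance (ending : Int) (start : Int) (out : List Int) : Decidable (Spec_getPalindromicGapfulEnding ending start out) := by unfold Spec_getPalindromicGapfulEnding; infer_instance

-- ===== CLAIM (what is proved, stated in full; the proofs are below) =====
def Claim_equal_getPalindromicGapfulEnding : Prop := ∀ (ending : Int) (start : Int), Dom_getPalindromicGapfulEnding ending start → Spec_getPalindromicGapfulEnding ending start (getPalindromicGapfulEnding ending start)

-- ===== LEMMAS AND PROOFS =====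

-- `Nat.toDigits 10` (used by PySem.Int.toChars) written through Mathlib's `Nat.digits`
theorem pvToDigitsCore_eq (f : Nat) : ∀ (n : Nat) (l : List Char), n < f →
    Nat.toDigitsCore 10 f n l =
      (if n = 0 then ['0'] else ((Nat.digits 10 n).map Nat.digitChar).reverse) ++ l := by
  induction f with
  | zero => intro n l h; omega
  | succ f ih =>
    intro n l h
    by_cases h0 : n / 10 = 0
    · have hn : n < 10 := by omega
      by_cases hz : n = 0
      · subst hz; simp [Nat.toDigitsCore, Nat.digitChar]
      · simp only [Nat.toDigitsCore, Nat.mod_eq_of_lt hn, h0, if_true, if_neg hz,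
          Nat.digits_of_lt 10 n hz hn, List.map_cons, List.map_nil, List.reverse_cons,
          List.reverse_nil, List.nil_append, List.cons_append]
    · have hnz : n ≠ 0 := by intro hz; simp [hz] at h0
      have hlt : n / 10 < f := by
        have : n / 10 < n := Nat.div_lt_self (by omega) (by norm_num)
        omega
      simp only [Nat.toDigitsCore, h0, if_false]
      rw [ih (n / 10) _ hlt, if_neg h0,
        Nat.digits_def' (n := n) (show (1:Nat) < 10 by norm_num) (by omega),
        if_neg hnz]
      simp [List.reverse_cons, List.append_assoc]

theorem pvToDigits10 (n : Nat) :
    Nat.toDigits 10 n = (if n = 0 then ['0'] else ((Nat.digits 10 n).map Nat.digitChar).reverse) := by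
  have := pvToDigitsCore_eq (n + 1) n [] (by omega)
  simpa [Nat.toDigits] using this

theorem pvToChars_nonneg {n : Int} (h : 0 ≤ n) :
    PySem.Int.toChars n =
      (if n = 0 then ['0'] else ((Nat.digits 10 n.toNat).map Nat.digitChar).reverse) := by
  unfold PySem.Int.toChars
  rw [if_neg (by omega), pvToDigits10]
  by_cases hz : n = 0
  · simp [hz]
  · rw [if_neg (by omega), if_neg hz]

theorem pvPal_iff (num : Int) :
    is_palindromic num = true ↔ PySem.Int.toChars num = (PySem.Int.toChars num).reverse := by
  unfold is_palindromic
  rw [PySem.List.slice?_none_none_neg_one]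
  simp

theorem pvLen_big {num : Int} (h : 100 ≤ num) :
    ¬ ((PySem.Int.toChars num).length : Int) < 3 := by
  rw [pvToChars_nonneg (by omega), if_neg (by omega)]
  have h3 : ¬ (Nat.digits 10 num.toNat).length ≤ 2 := by
    rw [Nat.digits_length_le_iff (by norm_num)]
    omega
  simp only [List.length_reverse, List.length_map]
  omega

theorem pvHead (num : Int) (h : 1 ≤ num) :
    ∃ (d : Nat) (t : List Char), d ≠ 0 ∧ d < 10 ∧
      PySem.Int.toChars num = Nat.digitChar d :: t := by
  rw [pvToChars_nonneg (by omega), if_neg (by omega)]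
  have hna : num.toNat ≠ 0 := by omega
  have hnn := (Nat.digits_ne_nil_iff_ne_zero (b := 10)).mpr hna
  obtain ⟨l', dl, hds⟩ : ∃ l' dl, Nat.digits 10 num.toNat = l' ++ [dl] :=
    ⟨_, _, (List.dropLast_append_getLast hnn).symm⟩
  refine ⟨dl, ((l'.map Nat.digitChar)).reverse, ?_, ?_, ?_⟩
  · have h2 := Nat.getLast_digit_ne_zero 10 hna
    have h3 : (Nat.digits 10 num.toNat).getLast? = some dl := by
      rw [hds]; simp
    rw [List.getLast?_eq_some_getLast hnn, Option.some_inj] at h3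
    rw [← h3]; exact h2
  · exact Nat.digits_lt_base (by norm_num) (by rw [hds]; simp)
  · rw [hds]; simp

theorem pvLast_of_pal {num : Int} {c : Char} {t : List Char}
    (hc : PySem.Int.toChars num = c :: t)
    (hp : PySem.Int.toChars num = (PySem.Int.toChars num).reverse) :
    PySem.List.pyGet? (PySem.Int.toChars num) (-1) = some c := by
  have hsplit : PySem.Int.toChars num = t.reverse ++ [c] := by
    conv_lhs => rw [hp, hc]
    simp
  rw [hsplit, PySem.List.pyGet?_neg_one_append_singleton]

-- `int(s[0]+s[-1])` on a nonzero digit char c is 11·(value of c)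
theorem pvOfChars_double {d : Nat} (h1 : 1 ≤ d) (h9 : d ≤ 9) :
    PySem.Int.ofChars? [Nat.digitChar d, Nat.digitChar d] = some (11 * (d : Int)) := by
  interval_cases d <;> decide

-- `int(s[0])` on a digit char is its value
theorem pvOfChars_single {d : Nat} (h : d < 10) :
    PySem.Int.ofChars? [Nat.digitChar d] = some (d : Int) := by
  interval_cases d <;> decide

theorem pvGap_pal {num : Int} {d : Nat} {t : List Char}
    (h100 : 100 ≤ num) (hd0 : d ≠ 0) (hd : d < 10)
    (hc : PySem.Int.toChars num = Nat.digitChar d :: t)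
    (hp : PySem.Int.toChars num = (PySem.Int.toChars num).reverse) :
    is_gapful num = decide ((11 * (d : Int)) ∣ num) := by
  unfold is_gapful
  rw [if_neg (pvLen_big h100)]
  have h0 : PySem.List.pyGet? (PySem.Int.toChars num) 0 = some (Nat.digitChar d) := by
    rw [hc, PySem.List.pyGet?_zero_cons]
  have h1 := pvLast_of_pal hc hp
  simp only [h0, h1, Option.getD_some]
  rw [pvOfChars_double (by omega) (by omega)]
  simp only [Option.getD_some]
  have := PySem.Int.mod_eq_zero_iff_dvd num (11 * (d : Int))
  by_cases hdvd : (11 * (d : Int)) ∣ num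
  · simp [this.mpr hdvd, hdvd]
  · have hne : PySem.Int.mod num (11 * (d : Int)) ≠ 0 := fun hcc => hdvd (this.mp hcc)
    simp [hne, hdvd]

-- B's test agrees with A's two-helper test on every candidate ≥ 100
theorem pvTest_eq (num : Int) (h : 100 ≤ num) :
    pvTest num = (is_palindromic num && is_gapful num) := by
  unfold pvTest
  by_cases hpal : is_palindromic num = true
  · obtain ⟨d, t, hd0, hd, hc⟩ := pvHead num (by omega)
    have hp := (pvPal_iff num).mp hpal
    have h0 : PySem.List.pyGet? (PySem.Int.toChars num) 0 = some (Nat.digitChar d) := by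
      rw [hc, PySem.List.pyGet?_zero_cons]
    rw [pvGap_pal h hd0 hd hc hp]
    rw [show ((PySem.Int.toChars num == (PySem.List.slice? (PySem.Int.toChars num) none none (-1)).getD []) = is_palindromic num) from rfl, hpal]
    simp only [Bool.true_and, h0, Option.getD_some, pvOfChars_single hd, Option.getD_some]
    have := PySem.Int.mod_eq_zero_iff_dvd num (11 * (d : Int))
    by_cases hdvd : (11 * (d : Int)) ∣ num
    · simp [this.mpr hdvd, hdvd]
    · have hne : PySem.Int.mod num (11 * (d : Int)) ≠ 0 := fun hcc => hdvd (this.mp hcc)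
      simp [hne, hdvd]
  · rw [show ((PySem.Int.toChars num == (PySem.List.slice? (PySem.Int.toChars num) none none (-1)).getD []) = is_palindromic num) from rfl]
    rw [Bool.not_eq_true] at hpal
    rw [hpal]
    simp

-- the unbounded witness family 10^(2j+3)+1 = 1 0…0 1 (an even number of digits)
theorem pvDvd11 (j : Nat) : (11 : Int) ∣ 10 ^ (2 * j + 3) + 1 := by
  induction j with
  | zero => decide
  | succ j ih =>
    have he : (10 : Int) ^ (2 * (j + 1) + 3) + 1 = 100 * (10 ^ (2 * j + 3) + 1) - 99 := by ring
    rw [he]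
    exact dvd_sub (Dvd.dvd.mul_left ih 100) (by norm_num)

theorem pvChars_family (j : Nat) :
    PySem.Int.toChars ((10 : Int) ^ (2 * j + 3) + 1) =
      '1' :: (List.replicate (2 * j + 2) '0' ++ ['1']) := by
  have hcast : ((10 : Int) ^ (2 * j + 3) + 1) = ((10 ^ (2 * j + 3) + 1 : Nat) : Int) := by
    push_cast; ring
  rw [hcast, pvToChars_nonneg (by positivity), if_neg (by positivity), Int.toNat_natCast]
  have hd : Nat.digits 10 (10 ^ (2 * j + 3) + 1) = [1] ++ List.replicate (2 * j + 2) 0 ++ [1] := by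
    have h := Nat.digits_append_zeroes_append_digits (b := 10) (k := 2 * j + 2) (m := 1) (n := 1)
      (by norm_num) (by norm_num)
    have h1 : Nat.digits 10 1 = [1] := Nat.digits_of_lt 10 1 (by norm_num) (by norm_num)
    rw [h1] at h
    rw [h]
    congr 1
    simp only [List.length_cons, List.length_nil]
    ring
  rw [hd]
  simp [List.reverse_append, List.map_replicate, Nat.digitChar]

theorem pvPG_family (j : Nat) :
    (is_palindromic ((10 : Int) ^ (2 * j + 3) + 1) && is_gapful ((10 : Int) ^ (2 * j + 3) + 1)) = true := by
  have hch := pvChars_family j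
  rw [Bool.and_eq_true]
  constructor
  · rw [pvPal_iff, hch]
    simp [List.reverse_append]
  · have h100 : (100 : Int) ≤ 10 ^ (2 * j + 3) + 1 := by
      have : (10 : Int) ^ 3 ≤ 10 ^ (2 * j + 3) := pow_le_pow_right₀ (by norm_num) (by omega)
      norm_num at this ⊢
      omega
    unfold is_gapful
    rw [if_neg (pvLen_big h100)]
    have h0 : PySem.List.pyGet? (PySem.Int.toChars ((10 : Int) ^ (2 * j + 3) + 1)) 0 = some '1' := by
      rw [hch, PySem.List.pyGet?_zero_cons]
    have h1 : PySem.List.pyGet? (PySem.Int.toChars ((10 : Int) ^ (2 * j + 3) + 1)) (-1) = some '1' := by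
      rw [hch, show ('1' :: (List.replicate (2 * j + 2) '0' ++ ['1'])) =
        (('1' :: List.replicate (2 * j + 2) '0') ++ ['1']) by simp,
        PySem.List.pyGet?_neg_one_append_singleton]
    simp only [h0, h1, Option.getD_some]
    rw [show PySem.Int.ofChars? ['1', '1'] = some 11 from by decide]
    simp only [Option.getD_some, beq_iff_eq]
    exact (PySem.Int.mod_eq_zero_iff_dvd _ 11).mpr (pvDvd11 j)

theorem pvPal_neg {num : Int} (h : num < 0) : is_palindromic num = false := by
  rw [Bool.eq_false_iff]
  intro hp
  rw [pvPal_iff] at hp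
  have hc : PySem.Int.toChars num = '-' :: Nat.toDigits 10 num.natAbs := by
    unfold PySem.Int.toChars; rw [if_pos h]
  have hna : num.natAbs ≠ 0 := by omega
  rw [pvToDigits10, if_neg hna] at hc
  obtain ⟨d, ds', hds⟩ := List.exists_cons_of_ne_nil (Nat.digits_ne_nil_iff_ne_zero.mpr hna)
  rw [hds] at hc
  rw [hc] at hp
  simp only [List.map_cons, List.reverse_cons, List.reverse_append, List.reverse_reverse,
    List.reverse_cons, List.reverse_nil, List.nil_append, List.cons_append] at hp
  have hd10 : d < 10 := Nat.digits_lt_base (by norm_num) (by rw [hds]; exact List.mem_cons_self)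
  have heq := List.head_eq_of_cons_eq hp
  interval_cases d <;> exact absurd heq (by decide)

theorem pvGap_small {num : Int} (h0 : 0 ≤ num) (h : num < 100) : is_gapful num = false := by
  have hlen : ((PySem.Int.toChars num).length : Int) < 3 := by
    rw [pvToChars_nonneg h0]
    by_cases hz : num = 0
    · simp [hz]
    · rw [if_neg hz]
      have := (Nat.digits_length_le_iff (by norm_num) num.toNat).mpr
        (show num.toNat < 10 ^ 2 by omega)
      simp only [List.length_reverse, List.length_map]
      omega
  unfold is_gapful
  rw [if_pos hlen]

theorem pvPG_dvd {num : Int} (h : (is_palindromic num && is_gapful num) = true) :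
    100 ≤ num ∧ 11 ∣ num := by
  rw [Bool.and_eq_true] at h
  obtain ⟨hpal, hgap⟩ := h
  have h0 : 0 ≤ num := by
    by_contra hneg
    rw [pvPal_neg (by omega)] at hpal; exact Bool.false_ne_true hpal
  have h100 : 100 ≤ num := by
    by_contra hlt
    rw [pvGap_small h0 (by omega)] at hgap; exact Bool.false_ne_true hgap
  obtain ⟨d, t, hd0, hd, hc⟩ := pvHead num (by omega)
  have hp := (pvPal_iff num).mp hpal
  rw [pvGap_pal h100 hd0 hd hc hp] at hgap
  rw [decide_eq_true_eq] at hgap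
  exact ⟨h100, dvd_trans ⟨(d : Int), rfl⟩ hgap⟩

-- pvN V x: how many palindromic gapful numbers lie in [x, V] (the potential that shows
-- the scan ceiling V is never reached while the result is short)
def pvN (V x : Int) : Int :=
  (((Finset.range (V + 1 - x).toNat).filter
      (fun j : Nat => (is_palindromic (x + (j : Int)) && is_gapful (x + (j : Int))) = true)).card : Int)

theorem pvN_pos_le {V x : Int} (h : 1 ≤ pvN V x) : x ≤ V := by
  unfold pvN at h
  have hne : ((Finset.range (V + 1 - x).toNat).filter
      (fun j : Nat => (is_palindromic (x + (j : Int)) && is_gapful (x + (j : Int))) = true)).Nonempty :=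
    Finset.card_pos.mp (by omega)
  obtain ⟨t, ht⟩ := hne
  simp only [Finset.mem_filter, Finset.mem_range] at ht
  omega

theorem pvN_step_le (V x : Int) : pvN V x ≤ pvN V (x + 1) + 1 := by
  unfold pvN
  by_cases hx : x ≤ V
  · have hn : (V + 1 - x).toNat = (V + 1 - (x + 1)).toNat + 1 := by omega
    have hsub : (Finset.range (V + 1 - x).toNat).filter
        (fun j : Nat => (is_palindromic (x + (j : Int)) && is_gapful (x + (j : Int))) = true) ⊆
        insert 0 (((Finset.range (V + 1 - (x + 1)).toNat).filter
          (fun j : Nat => (is_palindromic ((x + 1) + (j : Int)) && is_gapful ((x + 1) + (j : Int))) = true)).image (· + 1)) := by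
      intro j hj
      simp only [Finset.mem_filter, Finset.mem_range] at hj
      rcases Nat.eq_zero_or_pos j with hj0 | hj0
      · simp [hj0]
      · obtain ⟨i, rfl⟩ : ∃ i, j = i + 1 := ⟨j - 1, by omega⟩
        have harg : x + ((i + 1 : Nat) : Int) = (x + 1) + (i : Int) := by push_cast; ring
        rw [harg] at hj
        simp only [Finset.mem_insert, Finset.mem_image, Finset.mem_filter, Finset.mem_range]
        exact Or.inr ⟨i, ⟨⟨by omega, hj.2⟩, rfl⟩⟩
    have h1 := Finset.card_le_card hsub
    have h2 := Finset.card_insert_le (0 : Nat)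
      (((Finset.range (V + 1 - (x + 1)).toNat).filter
        (fun j : Nat => (is_palindromic ((x + 1) + (j : Int)) && is_gapful ((x + 1) + (j : Int))) = true)).image (· + 1))
    have h3 := Finset.card_image_le (s := (Finset.range (V + 1 - (x + 1)).toNat).filter
        (fun j : Nat => (is_palindromic ((x + 1) + (j : Int)) && is_gapful ((x + 1) + (j : Int))) = true)) (f := (· + 1))
    omega
  · have hz : (V + 1 - x).toNat = 0 := by omega
    rw [hz]
    simp only [Finset.range_zero, Finset.filter_empty, Finset.card_empty]
    have := Finset.card_pos (s := (Finset.range (V + 1 - (x + 1)).toNat).filter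
      (fun j : Nat => (is_palindromic ((x + 1) + (j : Int)) && is_gapful ((x + 1) + (j : Int))) = true))
    omega

theorem pvN_step_eq {x : Int} (V : Int) (hpg : (is_palindromic x && is_gapful x) = false) :
    pvN V x ≤ pvN V (x + 1) := by
  unfold pvN
  have hsub : (Finset.range (V + 1 - x).toNat).filter
      (fun j : Nat => (is_palindromic (x + (j : Int)) && is_gapful (x + (j : Int))) = true) ⊆
      ((Finset.range (V + 1 - (x + 1)).toNat).filter
        (fun j : Nat => (is_palindromic ((x + 1) + (j : Int)) && is_gapful ((x + 1) + (j : Int))) = true)).image (· + 1) := by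
    intro j hj
    simp only [Finset.mem_filter, Finset.mem_range] at hj
    rcases Nat.eq_zero_or_pos j with hj0 | hj0
    · exfalso
      rw [hj0] at hj
      simp only [Nat.cast_zero, add_zero] at hj
      rw [hpg] at hj
      exact Bool.false_ne_true hj.2
    · obtain ⟨i, rfl⟩ : ∃ i, j = i + 1 := ⟨j - 1, by omega⟩
      have harg : x + ((i + 1 : Nat) : Int) = (x + 1) + (i : Int) := by push_cast; ring
      rw [harg] at hj
      simp only [Finset.mem_image, Finset.mem_filter, Finset.mem_range]
      exact ⟨i, ⟨⟨by omega, hj.2⟩, rfl⟩⟩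
  have h1 := Finset.card_le_card hsub
  have h3 := Finset.card_image_le (s := (Finset.range (V + 1 - (x + 1)).toNat).filter
      (fun j : Nat => (is_palindromic ((x + 1) + (j : Int)) && is_gapful ((x + 1) + (j : Int))) = true)) (f := (· + 1))
  omega

-- at least `ending` palindromic gapful numbers lie in [start, pvBound ending start]
theorem pvInit (ending start : Int) : ending ≤ pvN (pvBound ending start) start := by
  by_cases hend : ending ≤ 0
  · unfold pvN; omega
  · set L := (Nat.digits 10 start.toNat).length with hL
    set e := ending.toNat with he
    have hee : (e : Int) = ending := by omega
    have hmono : StrictMono (fun i : Nat => (10 : Int) ^ (2 * (L + i) + 3) + 1) := by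
      intro a b hab
      have := pow_lt_pow_right₀ (show (1 : Int) < 10 by norm_num)
        (show 2 * (L + a) + 3 < 2 * (L + b) + 3 by omega)
      simp only
      linarith
    -- each family member g i := 10^(2(L+i)+3)+1, i < e, lies in (start, pvBound]
    have hgs : ∀ i : Nat, i < e → start < (10 : Int) ^ (2 * (L + i) + 3) + 1 ∧
        (10 : Int) ^ (2 * (L + i) + 3) + 1 ≤ pvBound ending start := by
      intro i hi
      constructor
      · have h1 : start ≤ (start.toNat : Int) := Int.self_le_toNat start
        have h2 : start.toNat < 10 ^ L := (Nat.digits_length_le_iff (by norm_num) start.toNat).mp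
          (by rw [hL])
        have h4 : ((start.toNat : Int)) < ((10 : Int)) ^ L := by exact_mod_cast h2
        have h3 : (10 : Int) ^ L ≤ (10 : Int) ^ (2 * (L + i) + 3) :=
          pow_le_pow_right₀ (by norm_num) (by omega)
        linarith
      · unfold pvBound
        rw [← hL, ← he]
        have : (10 : Int) ^ (2 * (L + i) + 3) ≤ (10 : Int) ^ (2 * (L + e) + 3) :=
          pow_le_pow_right₀ (by norm_num) (by omega)
        linarith
    -- inject range e into the counted window via i ↦ (g i - start).toNat
    have hcard := Finset.card_le_card_of_injOn
      (f := fun i : Nat => (((10 : Int) ^ (2 * (L + i) + 3) + 1) - start).toNat)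
      (s := Finset.range e)
      (t := (Finset.range (pvBound ending start + 1 - start).toNat).filter
        (fun j : Nat => (is_palindromic (start + (j : Int)) && is_gapful (start + (j : Int))) = true))
      (by
        intro i hi
        simp only [Finset.mem_coe, Finset.mem_range] at hi
        obtain ⟨hgt, hle⟩ := hgs i hi
        simp only [Finset.mem_coe, Finset.mem_filter, Finset.mem_range]
        constructor
        · omega
        · have harg : start + ((((10 : Int) ^ (2 * (L + i) + 3) + 1) - start).toNat : Int)
              = (10 : Int) ^ (2 * (L + i) + 3) + 1 := by omega
          rw [harg]
          exact pvPG_family (L + i))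
      (by
        intro i hi j hj hij
        simp only [Finset.mem_coe, Finset.mem_range] at hi hj
        have hgi := (hgs i hi).1
        have hgj := (hgs j hj).1
        have : (10 : Int) ^ (2 * (L + i) + 3) + 1 = (10 : Int) ^ (2 * (L + j) + 3) + 1 := by
          simp only at hij
          omega
        exact hmono.injective this)
    rw [Finset.card_range] at hcard
    unfold pvN
    omega

-- pvForL with any accumulator equals the accumulator followed by pvForL from []
theorem pvForL_acc (V : Int) (k : Nat) : ∀ (result : List Int) (num : Int),
    pvForL V k result num = result ++ pvForL V k [] num := by
  induction k with
  | zero => intro result num; simp [pvForL]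
  | succ k ih =>
    intro result num
    rw [pvForL, pvForL, ih, ih (([] : List Int) ++ [pvNextL V num])]
    simp

-- A's scan from num equals B's loop from m whenever m is the next multiple-of-11
-- candidate, no palindromic gapful number lies in [num, m), and enough remain below V
theorem pvMain (V ending : Int) (result : List Int) (num : Int) :
    ∀ (m : Int), (11 : Int) ∣ m → 110 ≤ m → num ≤ m →
      (∀ x : Int, num ≤ x → x < m → (is_palindromic x && is_gapful x) = false) →
      ending - result.length ≤ pvN V num →
      pvLoopA V ending result num = result ++ pvForL V (ending - result.length).toNat [] m := by
  induction result, num using pvLoopA.induct (V := V) (ending := ending) with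
  | case1 result num hv hguard hpg ih =>
    intro m h11 h110 hle hno hN
    have hm : m = num := by
      by_contra hne
      have := hno num le_rfl (lt_of_le_of_ne hle (fun h => hne h.symm))
      rw [hpg] at this
      simp at this
    subst hm
    obtain ⟨t, ht⟩ : ∃ t, (ending - result.length).toNat = t + 1 :=
      ⟨(ending - result.length).toNat - 1, by omega⟩
    have hTn : pvTest m = true := by
      rw [pvTest_eq m (pvPG_dvd hpg).1]; exact hpg
    have hnx : pvNextL V m = m := by rw [pvNextL, dif_pos hv, if_pos hTn]
    rw [pvLoopA, dif_pos hv, if_pos hguard, if_pos hpg, ht, pvForL, pvForL_acc]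
    have hrec := ih (m + 11) (dvd_add h11 ⟨1, by ring⟩) (by omega) (by omega)
      (by
        intro x hx1 hx2
        by_contra hcon
        rw [Bool.not_eq_false] at hcon
        obtain ⟨_, hdvd⟩ := pvPG_dvd hcon
        obtain ⟨a, ha⟩ := h11
        obtain ⟨b, hb⟩ := hdvd
        omega)
      (by
        have hstep := pvN_step_le V m
        simp only [List.length_append, List.length_cons, List.length_nil]
        push_cast
        omega)
    have hlen : (ending - ((result ++ [m]).length : Int)).toNat = t := by
      simp only [List.length_append, List.length_cons, List.length_nil]
      push_cast
      omega
    rw [hrec, hlen]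
    simp only [hnx, List.nil_append, List.append_assoc]
  | case2 result num hv hguard hpg ih =>
    intro m h11 h110 hle hno hN
    rw [Bool.not_eq_true] at hpg
    by_cases hm : m = num
    · subst hm
      have hTn : pvTest m = false := by rw [pvTest_eq m (by omega)]; exact hpg
      have hstep : ∀ (k : Nat),
          pvForL V k [] m = pvForL V k [] (m + 11) := by
        intro k
        cases k with
        | zero => rfl
        | succ k =>
          rw [pvForL, pvForL]
          have hs : pvNextL V m = pvNextL V (m + 11) := by
            rw [pvNextL, dif_pos hv, if_neg (by simp [hTn])]
          simp only [hs]
      rw [pvLoopA, dif_pos hv, if_pos hguard, if_neg (by rw [hpg]; exact Bool.false_ne_true), hstep]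
      apply ih
      · exact dvd_add h11 ⟨1, by ring⟩
      · omega
      · omega
      · intro x hx1 hx2
        by_contra hcon
        rw [Bool.not_eq_false] at hcon
        obtain ⟨_, hdvd⟩ := pvPG_dvd hcon
        obtain ⟨a, ha⟩ := h11
        obtain ⟨b, hb⟩ := hdvd
        omega
      · have := pvN_step_eq V hpg
        omega
    · have hlt : num < m := lt_of_le_of_ne hle (fun hx => hm hx.symm)
      rw [pvLoopA, dif_pos hv, if_pos hguard, if_neg (by rw [hpg]; exact Bool.false_ne_true)]
      apply ih
      · exact h11
      · omega
      · omega
      · intro x hx1 hx2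
        exact hno x (by omega) hx2
      · have := pvN_step_eq V hpg
        omega
  | case3 result num hv hguard =>
    intro m h11 h110 hle hno hN
    rw [pvLoopA, dif_pos hv, if_neg hguard]
    have hz : (ending - result.length).toNat = 0 := by omega
    rw [hz]
    simp [pvForL]
  | case4 result num hv =>
    intro m h11 h110 hle hno hN
    by_cases hguard : (result.length : Int) < ending
    · exfalso
      have h1 : 1 ≤ pvN V num := by omega
      exact hv (pvN_pos_le h1)
    · rw [pvLoopA, dif_neg hv]
      have hz : (ending - result.length).toNat = 0 := by omega
      rw [hz]
      simp [pvForL]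

-- ===== VERDICT (by name: the statement is the Claim_ definition above) =====
theorem getPalindromicGapfulEnding_spec : Claim_equal_getPalindromicGapfulEnding := by
  unfold Claim_equal_getPalindromicGapfulEnding Spec_getPalindromicGapfulEnding
  intro ending start _
  simp only [getPalindromicGapfulEnding, getPalindromicGapfulEnding_alt]
  have h := pvMain (pvBound ending start) ending [] start
    (max start 100 + PySem.Int.mod (-(max start 100)) 11)
    (by rw [PySem.Int.mod_eq_emod_of_pos (by norm_num)]; omega)
    (by
      have hlo : (100 : Int) ≤ max start 100 := le_max_right start 100
      rw [PySem.Int.mod_eq_emod_of_pos (by norm_num)]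
      omega)
    (by
      have hlo : start ≤ max start 100 := le_max_left start 100
      have := PySem.Int.mod_nonneg (-(max start 100)) (show (0:Int) < 11 by norm_num)
      omega)
    (by
      intro x hx1 hx2
      by_contra hcon
      rw [Bool.not_eq_false] at hcon
      obtain ⟨h100, hdvd⟩ := pvPG_dvd hcon
      have hxlo : max start 100 ≤ x := max_le hx1 h100
      rw [PySem.Int.mod_eq_emod_of_pos (by norm_num)] at hx2
      obtain ⟨b, hb⟩ := hdvd
      omega)
    (by simpa using pvInit ending start)
  rw [h]
  simp
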